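-- pv_equiv track=rewrite | github.com/kairi812/Machine-Learning-Beginners | src/algorithm_pazzle1.py | pleaseConfirm
-- ===== SOURCE A (Python) =====
-- def pleaseConfirm(caps):
--     start = forward = backward = 0
--     intervals = []
--     for i in range(len(caps)):
--         if caps[start] != caps[i]:
--             intervals.append((start, i-1, caps[start]))
--             if caps[start] == 'F':
--                 forward += 1
--             else:
--                 backward += 1
--             start = i
--     intervals.append((start, len(caps)-1, caps[start]))
--
--     if caps[start] == 'F':
--         forward += 1
--     else:
--         backward += 1
--
--     if forward < backward:
--         flip = 'F'
--     else:
--         flip = 'B'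
--
--     return intervals, flip
-- ===== SOURCE B (Python) =====
-- def pleaseConfirm(caps):
--     # Scan right-to-left, jumping run by run: locate the start of the run ending
--     # at e, record it, then jump past it; reverse the collected intervals and
--     # derive the counts from the finished list.
--     intervals = []
--     e = len(caps) - 1
--     while e >= 0:
--         s = e
--         while s > 0 and caps[s - 1] == caps[e]:
--             s -= 1
--         intervals.append((s, e, caps[s]))
--         e = s - 1
--     intervals.reverse()
--     forward = sum(1 for iv in intervals if iv[2] == 'F')
--     backward = len(intervals) - forward
--     return intervals, 'F' if forward < backward else 'B'
-- ===== Notes on version B (the rewrite author's own statement) =====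
-- stated objective: alternative
-- what changed: replaces A's left-to-right per-index scan with interleaved counting by a right-to-left run-jumping loop (inner loop finds each run's start, outer loop jumps past whole runs) that builds the interval list back-to-front, reverses it, and derives the counts from the finished list
import Mathlib
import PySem

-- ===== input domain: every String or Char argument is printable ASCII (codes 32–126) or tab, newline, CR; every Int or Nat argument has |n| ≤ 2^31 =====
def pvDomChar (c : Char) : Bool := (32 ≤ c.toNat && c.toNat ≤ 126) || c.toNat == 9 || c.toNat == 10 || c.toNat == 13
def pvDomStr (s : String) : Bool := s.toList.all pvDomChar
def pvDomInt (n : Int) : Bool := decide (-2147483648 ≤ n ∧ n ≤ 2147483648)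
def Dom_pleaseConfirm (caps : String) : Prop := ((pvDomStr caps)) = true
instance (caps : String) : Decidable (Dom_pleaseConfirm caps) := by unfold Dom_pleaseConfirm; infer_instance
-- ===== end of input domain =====

-- B traverses right-to-left, jumping run by run (inner loop finds each run's start),
-- reverses the collected intervals and counts over the finished list — a different
-- traversal order and decomposition from A's left-to-right per-index stateful scan.

-- ===== PORT A =====
-- caps[i] for an in-range index (exact on Pre_: every use below has i < cs.length)
def getc (cs : List Char) (i : Nat) : Char := cs.getD i ' '

-- loop body of A's for-loop; state = (start, forward, backward, intervals).
-- caps[start] / caps[i] are ported as cs.getD _ ' ': exact, since on Pre_ (nonempty caps)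
-- both indices are always in range, so Python never raises inside the loop.
def stepA (cs : List Char) (st : Nat × Nat × Nat × List (Int × Int × String)) (i : Nat) :
    Nat × Nat × Nat × List (Int × Int × String) :=
  if getc cs st.1 ≠ getc cs i then
    let ivs' := st.2.2.2 ++ [((st.1 : Int), (i : Int) - 1, String.singleton (getc cs st.1))]
    if getc cs st.1 = 'F' then (i, st.2.1 + 1, st.2.2.1, ivs')
    else (i, st.2.1, st.2.2.1 + 1, ivs')
  else st

def pleaseConfirm (caps : String) : (List (Int × Int × String)) × String :=
  let cs := caps.toList
  let st := (List.range cs.length).foldl (stepA cs) (0, 0, 0, [])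
  let ivs := st.2.2.2 ++ [((st.1 : Int), (cs.length : Int) - 1, String.singleton (getc cs st.1))]
  let fwd := if getc cs st.1 = 'F' then st.2.1 + 1 else st.2.1
  let bwd := if getc cs st.1 = 'F' then st.2.2.1 else st.2.2.1 + 1
  (ivs, if fwd < bwd then "F" else "B")

-- ===== PORT B =====
-- inner while loop of Source B: walk left from s while the previous char equals caps[e]
def findStart (cs : List Char) (e : Nat) (s : Nat) : Nat :=
  if h : 0 < s ∧ getc cs (s - 1) = getc cs e then findStart cs e (s - 1) else s
termination_by s
decreasing_by omega

-- cited by loopB's decreasing_by (termination of the port)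
theorem findStart_le (cs : List Char) (e : Nat) : ∀ s, findStart cs e s ≤ s := by
  intro s
  induction s using Nat.strong_induction_on with
  | _ s ih =>
    unfold findStart
    split
    · next h => have := ih (s - 1) (by omega); omega
    · exact le_refl s

-- outer while loop of Source B: e runs right-to-left, intervals appended per run
def loopB (cs : List Char) (e : Int) (acc : List (Int × Int × String)) :
    List (Int × Int × String) :=
  if _h : 0 ≤ e then
    let s := findStart cs e.toNat e.toNat
    loopB cs ((s : Int) - 1) (acc ++ [((s : Int), e, String.singleton (getc cs s))])
  else acc
termination_by (e + 1).toNat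
decreasing_by
  have hs := findStart_le cs e.toNat e.toNat
  omega

def pleaseConfirm_alt (caps : String) : (List (Int × Int × String)) × String :=
  let cs := caps.toList
  let ivs := (loopB cs ((cs.length : Int) - 1) []).reverse
  let f := (ivs.filter (fun t => t.2.2 = "F")).length
  let b := ivs.length - f
  (ivs, if f < b then "F" else "B")

-- ===== PRECONDITION & SPEC =====
-- Pre_ excludes exactly the empty string, on which A raises IndexError (caps[0]).
def Pre_pleaseConfirm (caps : String) : Prop := caps ≠ ""
instance (caps : String) : Decidable (Pre_pleaseConfirm caps) := by unfold Pre_pleaseConfirm; infer_instance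
def pvWitness_pleaseConfirm : String := "FBB"

def Spec_pleaseConfirm (caps : String) (out : (List (Int × Int × String)) × String) : Prop := out = pleaseConfirm_alt caps
instance (caps : String) (out : (List (Int × Int × String)) × String) : Decidable (Spec_pleaseConfirm caps out) := by unfold Spec_pleaseConfirm; infer_instance

-- ===== CLAIM (what is proved, stated in full; the proofs are below) =====
def Claim_equal_pleaseConfirm : Prop := ∀ (caps : String), Dom_pleaseConfirm caps → Pre_pleaseConfirm caps → Spec_pleaseConfirm caps (pleaseConfirm caps)

-- ===== LEMMAS AND PROOFS =====

-- boundaries of caps in [i, i+m)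
def bsIn (cs : List Char) (i m : Nat) : List Nat :=
  (List.range' i m).filter (fun k => getc cs k ≠ getc cs (k - 1))

-- intervals spanned by a start position and a list of boundaries (last interval excluded)
def mkIvs (cs : List Char) : Nat → List Nat → List (Int × Int × String)
  | _, [] => []
  | s, b :: bs => ((s : Int), (b : Int) - 1, String.singleton (getc cs s)) :: mkIvs cs b bs

def cF (l : List (Int × Int × String)) : Nat := (l.filter (fun t => t.2.2 = "F")).length
def cB (l : List (Int × Int × String)) : Nat := (l.filter (fun t => ¬ t.2.2 = "F")).length

def lastD (s : Nat) : List Nat → Nat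
  | [] => s
  | b :: bs => lastD b bs

-- closed interval list for the prefix of length m (m ≥ 1): A's final interval list
def fullTo (cs : List Char) (m : Nat) : List (Int × Int × String) :=
  mkIvs cs 0 (bsIn cs 1 (m - 1)) ++
    [((lastD 0 (bsIn cs 1 (m - 1)) : Int), (m : Int) - 1,
      String.singleton (getc cs (lastD 0 (bsIn cs 1 (m - 1)))))]

-- spec-side mirror of loopB: run intervals of the length-m prefix, last run first
def ivsR (cs : List Char) (m : Nat) : List (Int × Int × String) :=
  if m = 0 then [] else
    let s := findStart cs (m - 1) (m - 1)
    ((s : Int), (m : Int) - 1, String.singleton (getc cs s)) :: ivsR cs s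
termination_by m
decreasing_by
  have := findStart_le cs (m - 1) (m - 1)
  omega

theorem singleton_eq_F (c : Char) : (String.singleton c = "F") ↔ c = 'F' := by
  constructor
  · intro h
    have := congrArg String.toList h
    simpa [String.singleton] using this
  · rintro rfl; rfl

theorem cF_cons (t : Int × Int × String) (l : List (Int × Int × String)) :
    cF (t :: l) = (if t.2.2 = "F" then 1 else 0) + cF l := by
  simp [cF, List.filter_cons]; split_ifs <;> simp [Nat.add_comm]

theorem cB_cons (t : Int × Int × String) (l : List (Int × Int × String)) :
    cB (t :: l) = (if t.2.2 = "F" then 0 else 1) + cB l := by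
  simp [cB, List.filter_cons]; split_ifs <;> simp [Nat.add_comm]

theorem cF_add_cB (l : List (Int × Int × String)) : cF l + cB l = l.length := by
  induction l with
  | nil => rfl
  | cons t l ih => rw [cF_cons, cB_cons]; simp only [List.length_cons]; split_ifs <;> omega

theorem cF_append (l₁ l₂ : List (Int × Int × String)) : cF (l₁ ++ l₂) = cF l₁ + cF l₂ := by
  simp [cF, List.filter_append]

theorem cB_append (l₁ l₂ : List (Int × Int × String)) : cB (l₁ ++ l₂) = cB l₁ + cB l₂ := by
  simp [cB, List.filter_append]

-- the A-side loop over [i, i+m) computes exactly the boundary-derived data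
theorem loopA_eq (cs : List Char) :
    ∀ (m i start f b : Nat) (acc : List (Int × Int × String)),
    1 ≤ i → start < i →
    (∀ j, start ≤ j → j < i → getc cs j = getc cs start) →
    (List.range' i m).foldl (stepA cs) (start, f, b, acc) =
      (lastD start (bsIn cs i m),
       f + cF (mkIvs cs start (bsIn cs i m)),
       b + cB (mkIvs cs start (bsIn cs i m)),
       acc ++ mkIvs cs start (bsIn cs i m)) := by
  intro m
  induction m with
  | zero => intro i start f b acc _ _ _; simp [bsIn, mkIvs, lastD, cF, cB]
  | succ m ih =>
    intro i start f b acc h1 h2 hinv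
    rw [List.range'_succ, List.foldl_cons]
    have hprev : getc cs (i - 1) = getc cs start := hinv (i - 1) (by omega) (by omega)
    by_cases h : getc cs start = getc cs i
    · have hb : bsIn cs i (m + 1) = bsIn cs (i + 1) m := by
        simp only [bsIn, List.range'_succ, List.filter_cons]
        have : getc cs i = getc cs (i - 1) := by rw [hprev, h]
        simp [this]
      have hstep : stepA cs (start, f, b, acc) i = (start, f, b, acc) := by
        simp only [stepA]; rw [if_neg (not_not_intro h)]
      rw [hstep, hb, ih (i + 1) start f b acc (by omega) (by omega)
        (fun j hj1 hj2 => by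
          by_cases hji : j = i
          · subst hji; exact h.symm
          · exact hinv j hj1 (by omega))]
    · have hb : bsIn cs i (m + 1) = i :: bsIn cs (i + 1) m := by
        simp only [bsIn, List.range'_succ, List.filter_cons]
        have : ¬ getc cs i = getc cs (i - 1) := by rw [hprev]; exact fun hc => h hc.symm
        simp [this]
      have hinv' : ∀ j, i ≤ j → j < i + 1 → getc cs j = getc cs i := by
        intro j hj1 hj2; have : j = i := by omega
        simp [this]
      have hm : mkIvs cs start (bsIn cs i (m + 1)) =
          ((start : Int), (i : Int) - 1, String.singleton (getc cs start)) ::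
            mkIvs cs i (bsIn cs (i + 1) m) := by
        rw [hb]; rfl
      have hl : lastD start (bsIn cs i (m + 1)) = lastD i (bsIn cs (i + 1) m) := by
        rw [hb]; rfl
      have hcf := cF_cons ((start : Int), (i : Int) - 1, String.singleton (getc cs start))
        (mkIvs cs i (bsIn cs (i + 1) m))
      have hcb := cB_cons ((start : Int), (i : Int) - 1, String.singleton (getc cs start))
        (mkIvs cs i (bsIn cs (i + 1) m))
      by_cases hF : getc cs start = 'F'
      · have hstep : stepA cs (start, f, b, acc) i =
            (i, f + 1, b, acc ++ [((start : Int), (i : Int) - 1, String.singleton (getc cs start))]) := by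
          simp only [stepA]; rw [if_pos h, if_pos hF]
        rw [hstep, ih (i + 1) i (f + 1) b _ (by omega) (by omega) hinv', hm, hl, hcf, hcb]
        simp [singleton_eq_F, hF]
        omega
      · have hstep : stepA cs (start, f, b, acc) i =
            (i, f, b + 1, acc ++ [((start : Int), (i : Int) - 1, String.singleton (getc cs start))]) := by
          simp only [stepA]; rw [if_pos h, if_neg hF]
        rw [hstep, ih (i + 1) i f (b + 1) _ (by omega) (by omega) hinv', hm, hl, hcf, hcb]
        simp [singleton_eq_F, hF]
        omega

-- findStart walks through characters equal to caps[e] …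
theorem findStart_run (cs : List Char) (e : Nat) :
    ∀ s, getc cs s = getc cs e →
    ∀ j, findStart cs e s ≤ j → j ≤ s → getc cs j = getc cs e := by
  intro s
  induction s using Nat.strong_induction_on with
  | _ s ih =>
    intro hs j hj1 hj2
    rw [findStart] at hj1
    split at hj1
    · next h =>
      by_cases hjs : j = s
      · rw [hjs]; exact hs
      · exact ih (s - 1) (by omega) h.2 j hj1 (by omega)
    · have : j = s := by omega
      rw [this]; exact hs

-- … and stops at 0 or just after a differing character
theorem findStart_stop (cs : List Char) (e : Nat) :
    ∀ s, findStart cs e s = 0 ∨ getc cs (findStart cs e s - 1) ≠ getc cs e := by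
  intro s
  induction s using Nat.strong_induction_on with
  | _ s ih =>
    rw [findStart]
    split
    · next h => exact ih (s - 1) (by omega)
    · next h =>
      by_cases h0 : s = 0
      · exact Or.inl h0
      · exact Or.inr (by intro hc; exact h ⟨by omega, hc⟩)

-- loopB is ivsR plus the accumulator
theorem loopB_eq (cs : List Char) :
    ∀ (k : Nat) (e : Int) (acc : List (Int × Int × String)), (e + 1).toNat = k →
    loopB cs e acc = acc ++ ivsR cs (e + 1).toNat := by
  intro k
  induction k using Nat.strong_induction_on with
  | _ k ih =>
    intro e acc hk
    rw [loopB]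
    split
    · next h =>
      set s := findStart cs e.toNat e.toNat with hs
      have hsle : s ≤ e.toNat := findStart_le cs e.toNat e.toNat
      rw [ih ((s : Int) - 1 + 1).toNat (by omega) ((s : Int) - 1) _ rfl]
      have h1 : ((s : Int) - 1 + 1).toNat = s := by omega
      have h2 : (e + 1).toNat = e.toNat + 1 := by omega
      rw [h1]
      conv_rhs => rw [h2, ivsR]
      have h3 : ¬ (e.toNat + 1 = 0) := by omega
      rw [if_neg h3]
      have h4 : ((e.toNat + 1 : Nat) : Int) - 1 = e := by omega
      simp only [Nat.add_sub_cancel, ← hs, h4, List.append_assoc, List.singleton_append]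
    · next h =>
      have : (e + 1).toNat = 0 := by omega
      rw [this, ivsR, if_pos rfl, List.append_nil]

theorem lastD_append (x : Nat) : ∀ (l : List Nat) (t : Nat), lastD t (l ++ [x]) = x := by
  intro l
  induction l with
  | nil => intro t; rfl
  | cons b bs ih => intro t; exact ih b

theorem mkIvs_append (cs : List Char) (x : Nat) :
    ∀ (l : List Nat) (t : Nat),
    mkIvs cs t (l ++ [x]) =
      mkIvs cs t l ++ [((lastD t l : Int), (x : Int) - 1, String.singleton (getc cs (lastD t l)))] := by
  intro l
  induction l with
  | nil => intro t; rfl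
  | cons b bs ih => intro t; simp only [List.cons_append, mkIvs, lastD, ih b]

-- the reversed right-to-left run list is exactly A's closed interval list
theorem ivsR_rev (cs : List Char) :
    ∀ m, 1 ≤ m → m ≤ cs.length → (ivsR cs m).reverse = fullTo cs m := by
  intro m
  induction m using Nat.strong_induction_on with
  | _ m ih =>
    intro hm1 hmn
    rw [ivsR, if_neg (by omega : ¬ m = 0)]
    set s := findStart cs (m - 1) (m - 1) with hs
    have hsle : s ≤ m - 1 := findStart_le cs (m - 1) (m - 1)
    have hrun : ∀ j, s ≤ j → j ≤ m - 1 → getc cs j = getc cs (m - 1) :=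
      fun j hj1 hj2 => findStart_run cs (m - 1) (m - 1) rfl j (hs ▸ hj1) hj2
    have hstop := findStart_stop cs (m - 1) (m - 1)
    rw [← hs] at hstop
    simp only [List.reverse_cons]
    by_cases h0 : s = 0
    · -- single run covering the whole prefix
      have hb : bsIn cs 1 (m - 1) = [] := by
        apply List.filter_eq_nil_iff.mpr
        intro k hk
        rw [List.mem_range'_1] at hk
        have hk1 : getc cs k = getc cs (m - 1) := hrun k (by omega) (by omega)
        have hk2 : getc cs (k - 1) = getc cs (m - 1) := hrun (k - 1) (by omega) (by omega)
        simp [hk1, hk2]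
      rw [h0, ivsR, if_pos rfl]
      simp [fullTo, hb, mkIvs, lastD]
    · -- the run [s, m-1] splits off; induction on the prefix of length s
      have hs1 : 1 ≤ s := by omega
      have hbdy : getc cs s ≠ getc cs (s - 1) := by
        rcases hstop with h | h
        · exact absurd h h0
        · have : getc cs s = getc cs (m - 1) := hrun s (le_refl s) hsle
          rw [this]; exact fun hc => h hc.symm
      have hsplit : List.range' 1 (m - 1) = List.range' 1 (s - 1) ++ List.range' s (m - s) := by
        have := @List.range'_append 1 (s - 1) (m - s) 1
        simp only [Nat.one_mul] at this
        rw [show 1 + (s - 1) = s from by omega] at this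
        rw [show (s - 1) + (m - s) = m - 1 from by omega] at this
        exact this.symm
      have hright : (List.range' s (m - s)).filter (fun k => getc cs k ≠ getc cs (k - 1)) = [s] := by
        have hms : m - s = 1 + (m - s - 1) := by omega
        rw [hms, ← List.range'_append, List.filter_append]
        simp only [Nat.one_mul]
        have h1 : (List.range' s 1).filter (fun k => getc cs k ≠ getc cs (k - 1)) = [s] := by
          simp [List.range', hbdy]
        have h2 : (List.range' (s + 1) (m - s - 1)).filter
            (fun k => getc cs k ≠ getc cs (k - 1)) = [] := by
          apply List.filter_eq_nil_iff.mpr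
          intro k hk
          rw [List.mem_range'_1] at hk
          have hk1 : getc cs k = getc cs (m - 1) := hrun k (by omega) (by omega)
          have hk2 : getc cs (k - 1) = getc cs (m - 1) := hrun (k - 1) (by omega) (by omega)
          simp [hk1, hk2]
        rw [h1, h2, List.append_nil]
      have hB : bsIn cs 1 (m - 1) = bsIn cs 1 (s - 1) ++ [s] := by
        simp only [bsIn, hsplit, List.filter_append, hright]
      rw [ih s (by omega) hs1 (by omega)]
      simp only [fullTo, hB, mkIvs_append, lastD_append, List.append_assoc]
  
-- ===== VERDICT (by name: the statement is the Claim_ definition above) =====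
theorem pleaseConfirm_spec : Claim_equal_pleaseConfirm := by
  intro caps _ hpre
  have hne : caps.toList ≠ [] := fun h => hpre (String.toList_eq_nil_iff.mp h)
  unfold Spec_pleaseConfirm
  simp only [pleaseConfirm, pleaseConfirm_alt]
  set cs := caps.toList with hcs
  have hpos : 0 < cs.length := List.length_pos_of_ne_nil hne
  have hn : cs.length = (cs.length - 1) + 1 := by omega
  -- A's loop: first iteration (i = 0) is a no-op, then loopA_eq from i = 1
  have hrange : List.range cs.length = 0 :: List.range' 1 (cs.length - 1) := by
    conv_lhs => rw [List.range_eq_range', hn]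
    rw [List.range'_succ]
  have hstep0 : stepA cs (0, 0, 0, []) 0 = (0, 0, 0, []) := by
    simp only [stepA]; rw [if_neg (not_not_intro rfl)]
  have hloop := loopA_eq cs (cs.length - 1) 1 0 0 0 [] (by omega) (by omega)
    (fun j hj1 hj2 => by
      have h0 : j = 0 := by omega
      rw [h0])
  rw [hrange, List.foldl_cons, hstep0, hloop]
  -- B's loop: loopB = ivsR, and its reverse is A's interval list fullTo
  have hB : (loopB cs ((cs.length : Int) - 1) []).reverse = fullTo cs cs.length := by
    rw [loopB_eq cs ((cs.length : Int) - 1 + 1).toNat ((cs.length : Int) - 1) [] rfl]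
    have h1 : ((cs.length : Int) - 1 + 1).toNat = cs.length := by omega
    rw [h1, List.nil_append]
    exact ivsR_rev cs cs.length hpos (le_refl _)
  rw [hB]
  -- A's interval list is fullTo as well
  set bs := bsIn cs 1 (cs.length - 1) with hbs
  set M := mkIvs cs 0 bs with hM
  set L := lastD 0 bs with hL
  have hfull : fullTo cs cs.length
      = M ++ [((L : Int), (cs.length : Int) - 1, String.singleton (getc cs L))] := rfl
  rw [hfull]
  refine Prod.ext rfl ?_
  -- flip strings: A's running counts equal B's staged counts over the finished list
  have hcfapp := cF_append M [((L : Int), (cs.length : Int) - 1, String.singleton (getc cs L))]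
  have hcbapp := cB_append M [((L : Int), (cs.length : Int) - 1, String.singleton (getc cs L))]
  have hsum := cF_add_cB (M ++ [((L : Int), (cs.length : Int) - 1, String.singleton (getc cs L))])
  have hsingle : cF [((L : Int), (cs.length : Int) - 1, String.singleton (getc cs L))]
      = (if getc cs L = 'F' then 1 else 0) := by
    simp [cF, List.filter_cons, singleton_eq_F]; split_ifs <;> rfl
  have hsingleB : cB [((L : Int), (cs.length : Int) - 1, String.singleton (getc cs L))]
      = (if getc cs L = 'F' then 0 else 1) := by
    simp [cB, List.filter_cons, singleton_eq_F]; split_ifs <;> rfl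
  have hBfwd : ((M ++ [((L : Int), (cs.length : Int) - 1, String.singleton (getc cs L))]).filter
      (fun t => t.2.2 = "F")).length
      = cF M + (if getc cs L = 'F' then 1 else 0) := by
    have h' : cF (M ++ [((L : Int), (cs.length : Int) - 1, String.singleton (getc cs L))])
        = cF M + (if getc cs L = 'F' then 1 else 0) := by rw [hcfapp, hsingle]
    simpa [cF] using h'
  simp only [hBfwd, List.length_append]
  rw [hcfapp, hcbapp, hsingle, hsingleB] at hsum
  simp only [List.length_append] at hsum
  have hMsum := cF_add_cB M
  apply if_congr _ rfl rfl
  simp only [List.length_cons, List.length_nil]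
  split_ifs with hF <;> omega
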